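-- pv_equiv track=rewrite | github.com/pwmcclung/codeProbs | skiponacci.py | skiponacci
-- ===== SOURCE A (Python) =====
-- def skiponacci(n):
--     #establish an array and variables
--     newArr = []
--     first = 0
--     second = 1
--     third = 0
--     count = 0
--     # use a while loop to create the fibonacci sequence
--     while count <= n:
--         newArr.append(third)
--         count += 1
--         first = second
--         second = third
--         third = first + second
--     # remove the first element
--     newArr = newArr[1:]
--     # new array for the next part
--     arr = []
--     newCount = 0
--     for x in newArr:
--         if newCount % 2 == 0:
--             arr.append(str(x))
--         else:
--             arr.append('skip')
--         newCount += 1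
--     return ' '.join(arr)
-- ===== SOURCE B (Python) =====
-- def skiponacci(n):
--     # Only the odd-indexed Fibonacci numbers F(1), F(3), F(5), ... are printed;
--     # generate them directly via x_{k+1} = 3*x_k - x_{k-1}, pairing each with 'skip',
--     # then trim to exactly n tokens.
--     if n <= 0:
--         return ''
--     a, b = 1, 2
--     tokens = []
--     for _ in range((n + 1) // 2):
--         tokens.append(str(a))
--         tokens.append('skip')
--         a, b = b, 3 * b - a
--     return ' '.join(tokens[:n])
-- ===== Notes on version B (the rewrite author's own statement) =====
-- stated objective: alternative
-- what changed: Instead of generating every Fibonacci number and then a second pass alternating value/'skip' by a counter, B generates only the odd-indexed Fibonacci numbers (the only ones printed) with the recurrence x_next = three*x - prev, emitting each value paired with 'skip' in one loop, and trims to n tokens.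
import Mathlib
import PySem

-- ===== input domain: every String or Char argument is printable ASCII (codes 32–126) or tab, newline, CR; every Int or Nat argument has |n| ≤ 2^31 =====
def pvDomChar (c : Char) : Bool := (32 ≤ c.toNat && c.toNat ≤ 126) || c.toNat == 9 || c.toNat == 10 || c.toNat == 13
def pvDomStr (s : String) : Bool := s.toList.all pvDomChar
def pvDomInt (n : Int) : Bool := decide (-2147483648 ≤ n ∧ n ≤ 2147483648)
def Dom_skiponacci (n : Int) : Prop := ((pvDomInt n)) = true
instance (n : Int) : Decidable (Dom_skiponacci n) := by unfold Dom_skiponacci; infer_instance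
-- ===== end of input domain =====

-- B replaces A's generate-all-Fibonacci-then-alternate two-pass scheme by a single loop over
-- only the odd-indexed Fibonacci numbers (recurrence x_next = three*x - prev), pairing each with 'skip'.


-- ===== PORT A =====
-- the while loop: while count <= n: append third; advance (first,second,third)
def skiponacciLoop (n count first second third : Int) (newArr : List Int) : List Int :=
  if count ≤ n then
    skiponacciLoop n (count + 1) second third (second + third) (newArr ++ [third])
  else newArr
termination_by (n + 1 - count).toNat
decreasing_by omega

-- the for loop: alternate str(x) / 'skip' by newCount parity
def skiponacciJoinLoop : List Int → Int → List String → List String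
  | [], _, arr => arr
  | x :: xs, newCount, arr =>
      skiponacciJoinLoop xs (newCount + 1)
        (arr ++ [if PySem.Int.mod newCount 2 = 0 then PySem.Int.toStr x else "skip"])

def skiponacci (n : Int) : String :=
  let newArr := skiponacciLoop n 0 0 1 0 []
  let newArr2 := PySem.List.slice newArr (some 1) none
  let arr := skiponacciJoinLoop newArr2 0 []
  PySem.Str.join " " arr

-- ===== PORT B =====
-- for _ in range((n+1)//2): emit str(a), 'skip'; a,b = b, 3*b-a
def skiponacciAltLoop : Nat → Int → Int → List String → List String
  | 0, _, _, tokens => tokens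
  | k + 1, a, b, tokens =>
      skiponacciAltLoop k b (3 * b - a) (tokens ++ [PySem.Int.toStr a, "skip"])

def skiponacci_alt (n : Int) : String :=
  if n ≤ 0 then "" else
    let tokens := skiponacciAltLoop (PySem.Int.floordiv (n + 1) 2).toNat 1 2 []
    PySem.Str.join " " (PySem.List.slice tokens none (some n))

-- ===== PRECONDITION & SPEC =====
def Spec_skiponacci (n : Int) (out : String) : Prop := out = skiponacci_alt n
instance (n : Int) (out : String) : Decidable (Spec_skiponacci n out) := by unfold Spec_skiponacci; infer_instance

-- ===== CLAIM (what is proved, stated in full; the proofs are below) =====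
def Claim_equal_skiponacci : Prop := ∀ (n : Int), Dom_skiponacci n → Spec_skiponacci n (skiponacci n)

-- ===== LEMMAS AND PROOFS =====

-- mathematical Fibonacci over Int
def fibI : Nat → Int
  | 0 => 0
  | 1 => 1
  | m + 2 => fibI m + fibI (m + 1)

theorem fibI_add_two (m : Nat) : fibI (m + 2) = fibI m + fibI (m + 1) := rfl

-- the values A's while loop appends, from pair state (p, q)
def genA : Nat → Int → Int → List Int
  | 0, _, _ => []
  | m + 1, p, q => q :: genA m q (p + q)

-- the tokens A's for loop appends, from counter c
def tokA : List Int → Int → List String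
  | [], _ => []
  | x :: xs, c => (if PySem.Int.mod c 2 = 0 then PySem.Int.toStr x else "skip") :: tokA xs (c + 1)

-- the tokens B's loop appends
def genB : Nat → Int → Int → List String
  | 0, _, _ => []
  | k + 1, a, b => PySem.Int.toStr a :: "skip" :: genB k b (3 * b - a)

theorem skiponacciLoop_eq (m : Nat) : ∀ (n count first p q : Int) (acc : List Int),
    (n + 1 - count).toNat = m →
    skiponacciLoop n count first p q acc = acc ++ genA m p q := by
  induction m with
  | zero =>
    intro n count first p q acc h
    rw [skiponacciLoop, if_neg (by omega)]
    simp [genA]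
  | succ m ih =>
    intro n count first p q acc h
    rw [skiponacciLoop, if_pos (by omega)]
    rw [ih n (count + 1) p q (p + q) _ (by omega)]
    simp [genA]

theorem genA_fib (m : Nat) : ∀ (j : Nat) (p : Int), p + fibI j = fibI (j + 1) →
    genA m p (fibI j) = (List.range' j m).map fibI := by
  induction m with
  | zero => intro j p _; simp [genA]
  | succ m ih =>
    intro j p h
    rw [List.range'_succ]
    simp only [genA, List.map_cons, h]
    rw [ih (j + 1) (fibI j) (fibI_add_two j).symm]

theorem skiponacciJoinLoop_eq (xs : List Int) : ∀ (c : Int) (arr : List String),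
    skiponacciJoinLoop xs c arr = arr ++ tokA xs c := by
  induction xs with
  | nil => intro c arr; simp [skiponacciJoinLoop, tokA]
  | cons x xs ih => intro c arr; rw [skiponacciJoinLoop, ih]; simp [tokA]

theorem skiponacciAltLoop_eq (k : Nat) : ∀ (a b : Int) (tokens : List String),
    skiponacciAltLoop k a b tokens = tokens ++ genB k a b := by
  induction k with
  | zero => intro a b tokens; simp [skiponacciAltLoop, genB]
  | succ k ih => intro a b tokens; rw [skiponacciAltLoop, ih]; simp [genB]

theorem fibI_odd_step (j : Nat) : fibI (j + 4) = 3 * fibI (j + 2) - fibI j := by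
  have h1 := fibI_add_two (j + 2)
  have h2 := fibI_add_two (j + 1)
  have h3 := fibI_add_two j
  have e1 : j + 2 + 2 = j + 4 := by omega
  have e2 : j + 1 + 2 = j + 3 := by omega
  have e3 : j + 1 + 1 = j + 2 := by omega
  have e4 : j + 2 + 1 = j + 3 := by omega
  rw [e1] at h1; rw [e2, e3] at h2; rw [e4] at h1
  omega

theorem take_genB_eq_tokA (L : Nat) : ∀ (j : Nat) (c : Int), PySem.Int.mod c 2 = 0 →
    List.take L (genB ((L + 1) / 2) (fibI (2 * j + 1)) (fibI (2 * j + 3)))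
      = tokA ((List.range' (2 * j + 1) L).map fibI) c := by
  induction L using Nat.strong_induction_on with
  | _ L ih =>
    match L with
    | 0 => intro j c _; simp [genB, tokA]
    | 1 =>
      intro j c hc
      simp only [genB, tokA, List.range'_one, List.map_cons, List.map_nil,
        List.take_succ_cons, List.take_zero]
      rw [if_pos hc]
    | Nat.succ (Nat.succ L) =>
      intro j c hc
      have hmc := PySem.Int.mod_eq_emod_of_pos (a := c) (b := 2) (by omega)
      have hodd : ¬ PySem.Int.mod (c + 1) 2 = 0 := by
        rw [PySem.Int.mod_eq_emod_of_pos (by omega)]; rw [hmc] at hc; omega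
      have heven : PySem.Int.mod (c + 1 + 1) 2 = 0 := by
        rw [PySem.Int.mod_eq_emod_of_pos (by omega)]; rw [hmc] at hc; omega
      have hk : (L + 2 + 1) / 2 = (L + 1) / 2 + 1 := by omega
      rw [hk]
      simp only [genB, List.take_succ_cons]
      rw [show (3 * fibI (2 * j + 3) - fibI (2 * j + 1)) = fibI (2 * j + 5) by
            rw [show 2 * j + 5 = (2 * j + 1) + 4 by omega, fibI_odd_step (2 * j + 1)]]
      have hr : List.range' (2 * j + 1) (L + 2) =
          (2 * j + 1) :: (2 * j + 2) :: List.range' (2 * j + 3) L := by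
        rw [List.range'_succ, List.range'_succ]
      rw [hr]
      simp only [List.map_cons, tokA]
      rw [if_pos hc, if_neg hodd]
      rw [show (2 * j + 3) = 2 * (j + 1) + 1 by omega]
      rw [show (2 * j + 5) = 2 * (j + 1) + 3 by omega]
      rw [ih L (by omega) (j + 1) (c + 1 + 1) heven]

theorem newArr_eq (n : Int) : skiponacciLoop n 0 0 1 0 [] =
    (List.range' 0 (n + 1).toNat).map fibI := by
  rw [skiponacciLoop_eq (n + 1).toNat n 0 0 1 0 [] (by omega)]
  rw [show (0 : Int) = fibI 0 from rfl]
  rw [genA_fib (n + 1).toNat 0 1 (by decide)]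
  simp

theorem skiponacci_eq_alt (n : Int) : skiponacci n = skiponacci_alt n := by
  by_cases hn : n ≤ 0
  · simp only [skiponacci, skiponacci_alt, if_pos hn]
    rw [newArr_eq]
    rw [PySem.List.slice_from _ (by omega : (0:Int) ≤ 1)]
    have hnil : ((List.range' 0 (n + 1).toNat).map fibI).drop (1 : Int).toNat = [] := by
      apply List.eq_nil_of_length_eq_zero
      simp; omega
    rw [hnil]
    rfl
  · simp only [skiponacci, skiponacci_alt, if_neg (show ¬ n ≤ 0 by omega)]
    rw [newArr_eq]
    rw [PySem.List.slice_from _ (by omega : (0:Int) ≤ 1)]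
    rw [skiponacciAltLoop_eq]
    rw [PySem.List.slice_to _ (by omega : (0:Int) ≤ n)]
    rw [skiponacciJoinLoop_eq]
    have hM : (n + 1).toNat = n.toNat + 1 := by omega
    rw [hM, List.range'_succ]
    have hfd : (PySem.Int.floordiv (n + 1) 2).toNat = (n.toNat + 1) / 2 := by
      rw [PySem.Int.floordiv_eq_ediv_of_pos (by omega)]
      omega
    have h6 := take_genB_eq_tokA n.toNat 0 0 (by decide)
    norm_num at h6
    simp only [hfd, List.map_cons, List.nil_append, Int.toNat_one, List.drop_succ_cons,
      List.drop_zero]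
    rw [show (1 : Int) = fibI 1 from rfl, show (2 : Int) = fibI 3 from rfl]
    rw [h6]

-- ===== VERDICT (by name: the statement is the Claim_ definition above) =====
theorem skiponacci_spec : Claim_equal_skiponacci := by
  intro n _
  unfold Spec_skiponacci
  exact skiponacci_eq_alt n
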